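-- pv_equiv track=rewrite | github.com/n0xiv4/leic-t-ist | fp/proj1/funcs.py | corta_texto
-- ===== SOURCE A (Python) =====
-- def corta_texto(txt, larg):
--     '''
--         corta_texto(txt, larg) é a função que recebe uma cadeia de
--         caracteres e um inteiro positivo correspondentes a um texto limpo
--         e uma largura de coluna correspondente, e que devolve duas subcadeias
--         de caracteres limpas - a primeira contendo todas as palavras completas
--         desde o ínicio da cadeia original até ao comprimento descrito, e a
--         segunda contendo o resto do texto de entrada.
--     '''
--     char = -1
--     txt = txt.split()
--     for x in range(len(txt)):
--         char += len(txt[x]) + 1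
--         if char > larg:
--             txt_a = " ".join(txt[:x])
--             txt_b = " ".join(txt[x:])
--             return txt_a, txt_b
--
--     if char <= larg:
--         txt_a = " ".join(txt)
--         txt_b = ""
--         return txt_a, txt_b
-- ===== SOURCE B (Python) =====
-- from itertools import accumulate
-- from bisect import bisect_right
--
--
-- def corta_texto(txt, larg):
--     words = txt.split()
--     table = list(accumulate(len(w) + 1 for w in words))
--     k = bisect_right(table, larg + 1)
--     return " ".join(words[:k]), " ".join(words[k:])
-- ===== Notes on version B (the rewrite author's own statement) =====
-- stated objective: idiomatic
-- what changed: Replaces the index loop with running counter and early return by a declarative pipeline: build the full cumulative joined-length table with itertools.accumulate, locate the split index with bisect_right, and slice-join once.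
-- outside the precondition, e.g. on corta_texto('', -5): A returns None, B returns ('', '')
import Mathlib
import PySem

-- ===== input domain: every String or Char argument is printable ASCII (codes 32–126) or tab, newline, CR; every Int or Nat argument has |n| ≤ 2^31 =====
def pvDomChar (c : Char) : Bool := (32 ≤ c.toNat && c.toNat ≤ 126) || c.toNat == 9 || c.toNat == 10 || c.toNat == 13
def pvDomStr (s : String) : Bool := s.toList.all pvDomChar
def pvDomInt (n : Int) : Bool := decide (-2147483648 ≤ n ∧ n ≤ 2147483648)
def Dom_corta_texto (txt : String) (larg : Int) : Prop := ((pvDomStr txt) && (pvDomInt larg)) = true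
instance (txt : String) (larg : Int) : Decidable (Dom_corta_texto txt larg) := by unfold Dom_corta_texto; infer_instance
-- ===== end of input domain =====

-- B replaces A's counting loop with an accumulate table + bisect split; same value wherever A returns a pair.

-- ===== PORT A =====
-- A's for-loop over range(len(txt)): structural recursion; 'pre' is txt[:x], 'rest' is txt[x:], 'char' the running counter.
-- On the inputs excluded by Pre_ (no words and larg < -1) Python A falls off and returns None; the port returns ("","") there.
def cortaGo (larg : Int) (pre rest : List String) (char : Int) : String × String :=
  match rest with
  | [] => if char ≤ larg then (PySem.Str.join " " pre, "") else ("", "")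
  | w :: rs =>
    let char' := char + PySem.Str.len w + 1
    if char' > larg then (PySem.Str.join " " pre, PySem.Str.join " " (w :: rs))
    else cortaGo larg (pre ++ [w]) rs char'

def corta_texto (txt : String) (larg : Int) : String × String :=
  let words := PySem.Str.split₀ txt
  cortaGo larg [] words (-1)

-- ===== PORT B =====
-- accumulate(len(w)+1 for w in words) as a foldl building the table; bisect_right on the
-- strictly increasing table = first index whose entry exceeds larg+1 (List.findIdx).
def corta_texto_alt (txt : String) (larg : Int) : String × String :=
  let words := PySem.Str.split₀ txt
  let table := (words.foldl (fun (st : List Int × Int) w =>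
      let s := st.2 + PySem.Str.len w + 1
      (st.1 ++ [s], s)) ([], 0)).1
  let k := table.findIdx (fun v => decide (v > larg + 1))
  (PySem.Str.join " " (words.take k), PySem.Str.join " " (words.drop k))

-- ===== PRECONDITION & SPEC =====
-- Pre_ excludes inputs with no words and larg < -1, on which Python A falls off the end and
-- returns None, which is not a value of the declared pair type.
def Pre_corta_texto (txt : String) (larg : Int) : Prop :=
  PySem.Str.split₀ txt ≠ [] ∨ -1 ≤ larg
instance (txt : String) (larg : Int) : Decidable (Pre_corta_texto txt larg) := by
  unfold Pre_corta_texto; infer_instance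

def pvWitness_corta_texto : String × Int := ("ola mundo bom", 8)

def Spec_corta_texto (txt : String) (larg : Int) (out : String × String) : Prop := out = corta_texto_alt txt larg
instance (txt : String) (larg : Int) (out : String × String) : Decidable (Spec_corta_texto txt larg out) := by unfold Spec_corta_texto; infer_instance

-- ===== CLAIM (what is proved, stated in full; the proofs are below) =====
def Claim_equal_corta_texto : Prop := ∀ (txt : String) (larg : Int), Dom_corta_texto txt larg → Pre_corta_texto txt larg → Spec_corta_texto txt larg (corta_texto txt larg)

-- ===== LEMMAS AND PROOFS =====

/-- Joined length (plus the trailing separator) of a word list. -/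
def pvPsum (l : List String) : Int := (l.map (fun w => PySem.Str.len w + 1)).sum

/-- The cumulative table accumulate produces, starting from a base. -/
def pvAccFrom (base : Int) : List String → List Int
  | [] => []
  | w :: rs => (base + PySem.Str.len w + 1) :: pvAccFrom (base + PySem.Str.len w + 1) rs

theorem pvPsum_append_singleton (pre : List String) (w : String) :
    pvPsum (pre ++ [w]) = pvPsum pre + PySem.Str.len w + 1 := by
  simp [pvPsum]; ring

theorem pvFold_table (l : List String) : ∀ (acc0 : List Int) (c : Int),
    (l.foldl (fun (st : List Int × Int) w =>
      (st.1 ++ [st.2 + PySem.Str.len w + 1], st.2 + PySem.Str.len w + 1)) (acc0, c))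
      = (acc0 ++ pvAccFrom c l, c + pvPsum l) := by
  induction l with
  | nil => intro acc0 c; simp [pvAccFrom, pvPsum]
  | cons w rs ih =>
      intro acc0 c
      simp only [List.foldl_cons, ih, pvAccFrom, pvPsum, List.map_cons, List.sum_cons,
        Prod.mk.injEq]
      exact ⟨by simp, by ring⟩

theorem pvGo_spec (larg : Int) : ∀ (rest pre : List String),
    (pre = [] ∨ pvPsum pre - 1 ≤ larg) →
    cortaGo larg pre rest (pvPsum pre - 1) =
      ((PySem.Str.join " " (pre ++ rest.take ((pvAccFrom (pvPsum pre) rest).findIdx (fun v => decide (v > larg + 1))))),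
       (PySem.Str.join " " (rest.drop ((pvAccFrom (pvPsum pre) rest).findIdx (fun v => decide (v > larg + 1)))))) := by
  intro rest
  induction rest with
  | nil =>
      intro pre h
      simp only [cortaGo, pvAccFrom, List.findIdx_nil, List.take_nil, List.drop_nil,
        List.append_nil]
      by_cases hc : pvPsum pre - 1 ≤ larg
      · simp [hc, PySem.Str.join]
      · rcases h with h | h
        · subst h
          simp [hc, PySem.Str.join, PySem.Chars.join, List.intercalate]
        · exact absurd h hc
  | cons w rs ih =>
      intro pre h
      simp only [cortaGo, pvAccFrom, List.findIdx_cons, PySem.Str.len_eq]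
      have hlen : w.toList.length = w.length := by simp
      by_cases hs : pvPsum pre - 1 + (w.toList.length : Int) + 1 > larg
      · rw [if_pos hs]
        have hb : larg < pvPsum pre + (w.length : Int) := by omega
        simp [hb]
      · rw [if_neg hs]
        have hb : ¬ (larg < pvPsum pre + (w.length : Int)) := by omega
        have e2 : pvPsum pre + (w.length : Int) + 1 = pvPsum (pre ++ [w]) := by
          rw [pvPsum_append_singleton]; simp
        have e1 : pvPsum pre - 1 + (w.toList.length : Int) + 1 = pvPsum (pre ++ [w]) - 1 := by
          rw [pvPsum_append_singleton]; simp; omega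
        rw [e1, ih (pre ++ [w]) (Or.inr (by omega))]
        have hb' : ¬ (larg + 1 < pvPsum (pre ++ [w])) := by omega
        simp [e2, hb', List.append_assoc]

theorem corta_texto_eq_alt (txt : String) (larg : Int) :
    corta_texto txt larg = corta_texto_alt txt larg := by
  have h0 : pvPsum ([] : List String) = 0 := by simp [pvPsum]
  have h2 := pvGo_spec larg (PySem.Str.split₀ txt) [] (Or.inl rfl)
  rw [h0] at h2
  simp only [List.nil_append] at h2
  simp only [corta_texto, corta_texto_alt]
  rw [pvFold_table]
  simp only [List.nil_append]
  have hm1 : (0 : Int) - 1 = -1 := by norm_num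
  rw [hm1] at h2
  exact h2

-- ===== VERDICT (by name: the statement is the Claim_ definition above) =====
theorem corta_texto_spec : Claim_equal_corta_texto := by
  intro txt larg _ _
  unfold Spec_corta_texto
  exact corta_texto_eq_alt txt larg
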